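-- pv_equiv track=rewrite | github.com/Rishiraj-Yadav/SonarBot | assistant/automation/desktop_routine_executor.py | summarize_steps
-- ===== SOURCE A (Python) =====
-- from typing import Any
--
-- def summarize_steps(steps: list[dict[str, Any]]) -> str:
--     parts: list[str] = []
--     for step in steps:
--         step_type = str(step.get("type", "")).strip().lower()
--         if step_type == "open_app":
--             parts.append(f"open {step.get('target', 'app')}")
--         elif step_type == "open_host_path":
--             parts.append(f"open {step.get('path', 'path')}")
--         elif step_type == "snap_window":
--             parts.append(f"snap {step.get('target', 'window')} {step.get('position', 'left')}")
--         elif step_type == "move_host_file":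
--             parts.append("move file")
--         elif step_type == "copy_host_file":
--             parts.append("copy file")
--         elif step_type == "notify":
--             parts.append("notify")
--         elif step_type == "desktop_read_screen":
--             parts.append("read screen")
--         elif step_type == "desktop_screenshot":
--             parts.append("capture screenshot")
--         elif step_type == "desktop_keyboard_hotkey":
--             parts.append(f"press {step.get('hotkey', 'hotkey')}")
--         elif step_type == "desktop_keyboard_type":
--             parts.append("type text")
--         else:
--             parts.append(step_type.replace("_", " "))
--     if not parts:
--         return "no steps"
--     if len(parts) <= 4:
--         return ", ".join(parts)
--     return ", ".join(parts[:4]) + f", and {len(parts) - 4} more"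
-- ===== SOURCE B (Python) =====
-- # A data-driven template table plus direct recursive string building: no parts list, no join/slice.
-- _SPEC = {
--     "open_app": ["open ", ("target", "app")],
--     "open_host_path": ["open ", ("path", "path")],
--     "snap_window": ["snap ", ("target", "window"), " ", ("position", "left")],
--     "move_host_file": ["move file"],
--     "copy_host_file": ["copy file"],
--     "notify": ["notify"],
--     "desktop_read_screen": ["read screen"],
--     "desktop_screenshot": ["capture screenshot"],
--     "desktop_keyboard_hotkey": ["press ", ("hotkey", "hotkey")],
--     "desktop_keyboard_type": ["type text"],
-- }
--
-- def _fragment(step):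
--     t = str(step.get("type", "")).strip().lower()
--     pieces = _SPEC.get(t)
--     if pieces is None:
--         return t.replace("_", " ")
--     return "".join(p if isinstance(p, str) else step.get(*p) for p in pieces)
--
-- def _render(steps, k, suffix):
--     frag = _fragment(steps[0])
--     if k == 1:
--         return frag + suffix
--     return frag + ", " + _render(steps[1:], k - 1, suffix)
--
-- def summarize_steps(steps):
--     n = len(steps)
--     if n == 0:
--         return "no steps"
--     suffix = f", and {n - 4} more" if n > 4 else ""
--     return _render(steps, min(n, 4), suffix)
-- ===== Notes on version B (the rewrite author's own statement) =====
-- stated objective: alternative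
-- what changed: Replaces A's if/elif chain, parts list and join/slice/truncate postprocessing by a declarative piece-template table (literal/field pieces filled per step) and a recursion that builds the final string directly, baking the 'and N more' suffix in instead of slicing a parts list.
import Mathlib
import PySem

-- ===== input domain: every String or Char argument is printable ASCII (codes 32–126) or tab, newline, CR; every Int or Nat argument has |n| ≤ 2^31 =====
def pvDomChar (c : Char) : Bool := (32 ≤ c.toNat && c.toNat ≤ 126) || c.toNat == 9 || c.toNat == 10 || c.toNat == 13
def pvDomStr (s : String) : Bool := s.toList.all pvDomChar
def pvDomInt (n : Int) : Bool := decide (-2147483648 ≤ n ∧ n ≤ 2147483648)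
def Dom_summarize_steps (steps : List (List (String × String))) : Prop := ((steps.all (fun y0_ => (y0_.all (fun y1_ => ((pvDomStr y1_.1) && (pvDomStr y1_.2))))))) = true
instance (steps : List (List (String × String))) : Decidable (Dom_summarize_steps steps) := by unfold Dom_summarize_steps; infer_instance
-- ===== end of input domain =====

-- B replaces A's parts-list + if/elif chain + join/slice tail by a declarative piece-template
-- table and a recursion that builds the final string directly (objective: alternative).

-- step.get(k, d): first-match lookup in the association list (dict in insertion order)
def pvStepGet (step : List (String × String)) (k d : String) : String :=
  PySem.Dict.getD (PySem.Dict.mk step) k d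

-- ===== PORT A =====
-- the body of A's for-loop: appends one summary fragment to parts
def pvLoopBodyA (parts : List String) (step : List (String × String)) : List String :=
  let step_type := PySem.Str.lower (PySem.Str.strip (pvStepGet step "type" ""))
  if step_type == "open_app" then parts ++ ["open " ++ pvStepGet step "target" "app"]
  else if step_type == "open_host_path" then parts ++ ["open " ++ pvStepGet step "path" "path"]
  else if step_type == "snap_window" then
    parts ++ ["snap " ++ pvStepGet step "target" "window" ++ " " ++ pvStepGet step "position" "left"]
  else if step_type == "move_host_file" then parts ++ ["move file"]
  else if step_type == "copy_host_file" then parts ++ ["copy file"]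
  else if step_type == "notify" then parts ++ ["notify"]
  else if step_type == "desktop_read_screen" then parts ++ ["read screen"]
  else if step_type == "desktop_screenshot" then parts ++ ["capture screenshot"]
  else if step_type == "desktop_keyboard_hotkey" then parts ++ ["press " ++ pvStepGet step "hotkey" "hotkey"]
  else if step_type == "desktop_keyboard_type" then parts ++ ["type text"]
  else parts ++ [PySem.Str.replace step_type "_" " "]

def summarize_steps (steps : List (List (String × String))) : String :=
  let parts := steps.foldl pvLoopBodyA []
  if parts == [] then "no steps"
  else if parts.length ≤ 4 then PySem.Str.join ", " parts
  else PySem.Str.join ", " (PySem.List.slice parts none (some 4)) ++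
       ", and " ++ PySem.Int.toStr ((parts.length : Int) - 4) ++ " more"

-- ===== PORT B =====
-- a template piece: a literal string, or a field reference (key, default) read off the step
inductive PvPiece : Type
  | lit : String → PvPiece
  | fld : String → String → PvPiece
deriving DecidableEq, Repr

-- _SPEC: the declarative template table of Source B
def pvSpec : PySem.Dict String (List PvPiece) := PySem.Dict.mk
  [("open_app", [.lit "open ", .fld "target" "app"]),
   ("open_host_path", [.lit "open ", .fld "path" "path"]),
   ("snap_window", [.lit "snap ", .fld "target" "window", .lit " ", .fld "position" "left"]),
   ("move_host_file", [.lit "move file"]),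
   ("copy_host_file", [.lit "copy file"]),
   ("notify", [.lit "notify"]),
   ("desktop_read_screen", [.lit "read screen"]),
   ("desktop_screenshot", [.lit "capture screenshot"]),
   ("desktop_keyboard_hotkey", [.lit "press ", .fld "hotkey" "hotkey"]),
   ("desktop_keyboard_type", [.lit "type text"])]

def pvPieceVal (step : List (String × String)) : PvPiece → String
  | .lit s => s
  | .fld k d => pvStepGet step k d

def pvFragmentB (step : List (String × String)) : String :=
  let t := PySem.Str.lower (PySem.Str.strip (pvStepGet step "type" ""))
  match PySem.Dict.get? pvSpec t with
  | none => PySem.Str.replace t "_" " "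
  | some pieces => PySem.Str.join "" (pieces.map (pvPieceVal step))

-- _render: builds the result string directly; only ever called with 1 ≤ k ≤ len(steps),
-- so steps[0] (which would raise on []) is ported as headD.
def pvRender : List (List (String × String)) → Nat → String → String
  | _, 0, _ => ""   -- unreachable: _render is only called with k ≥ 1
  | steps, 1, suffix => pvFragmentB (steps.headD []) ++ suffix
  | steps, Nat.succ (Nat.succ k), suffix =>
      pvFragmentB (steps.headD []) ++ ", " ++ pvRender steps.tail (k + 1) suffix

def summarize_steps_alt (steps : List (List (String × String))) : String :=
  let n := steps.length
  if n == 0 then "no steps"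
  else
    let suffix := if 4 < n then ", and " ++ PySem.Int.toStr ((n : Int) - 4) ++ " more" else ""
    pvRender steps (min n 4) suffix

-- ===== PRECONDITION & SPEC =====
def Spec_summarize_steps (steps : List (List (String × String))) (out : String) : Prop := out = summarize_steps_alt steps
instance (steps : List (List (String × String))) (out : String) : Decidable (Spec_summarize_steps steps out) := by unfold Spec_summarize_steps; infer_instance

-- ===== CLAIM (what is proved, stated in full; the proofs are below) =====
def Claim_equal_summarize_steps : Prop := ∀ (steps : List (List (String × String))), Dom_summarize_steps steps → Spec_summarize_steps steps (summarize_steps steps)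

-- ===== LEMMAS AND PROOFS =====

lemma pvJoin_singleton (x : String) : PySem.Str.join ", " [x] = x := by
  simp [PySem.Str.join, PySem.Chars.join, List.intercalate]

lemma pvJoin_cons (x y : String) (ys : List String) :
    PySem.Str.join ", " (x :: y :: ys) = x ++ ", " ++ PySem.Str.join ", " (y :: ys) := by
  simp only [PySem.Str.join, PySem.Chars.join, List.intercalate, List.map_cons]
  rw [List.intersperse_cons₂, List.flatten_cons, List.flatten_cons, ← List.append_assoc,
      String.ofList_append, String.ofList_append, String.ofList_toList]
  rfl

lemma pvJoin0_one (a : String) : PySem.Str.join "" [a] = a := by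
  simp [PySem.Str.join, PySem.Chars.join, List.intercalate]

lemma pvJoin0_two (a b : String) : PySem.Str.join "" [a, b] = a ++ b := by
  simp [PySem.Str.join, PySem.Chars.join, List.intercalate, String.ofList_append,
        String.ofList_toList]

lemma pvJoin0_four (a b c d : String) :
    PySem.Str.join "" [a, b, c, d] = a ++ (b ++ (c ++ d)) := by
  simp [PySem.Str.join, PySem.Chars.join, List.intercalate, String.ofList_append,
        String.ofList_toList]

-- each step contributes the same fragment in A and B
lemma pvLoopBodyA_eq (parts : List String) (step : List (String × String)) :
    pvLoopBodyA parts step = parts ++ [pvFragmentB step] := by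
  unfold pvLoopBodyA pvFragmentB
  generalize PySem.Str.lower (PySem.Str.strip (pvStepGet step "type" "")) = st
  by_cases h1 : st = "open_app"
  · subst h1
    simp [pvPieceVal, pvJoin0_two, show PySem.Dict.get? pvSpec "open_app" = some [.lit "open ", .fld "target" "app"] from rfl]
  by_cases h2 : st = "open_host_path"
  · subst h2
    simp [pvPieceVal, pvJoin0_two, show PySem.Dict.get? pvSpec "open_host_path" = some [.lit "open ", .fld "path" "path"] from rfl]
  by_cases h3 : st = "snap_window"
  · subst h3
    simp [pvPieceVal, pvJoin0_four, String.append_assoc, show PySem.Dict.get? pvSpec "snap_window" = some [.lit "snap ", .fld "target" "window", .lit " ", .fld "position" "left"] from rfl]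
  by_cases h4 : st = "move_host_file"
  · subst h4
    simp [pvPieceVal, pvJoin0_one, show PySem.Dict.get? pvSpec "move_host_file" = some [.lit "move file"] from rfl]
  by_cases h5 : st = "copy_host_file"
  · subst h5
    simp [pvPieceVal, pvJoin0_one, show PySem.Dict.get? pvSpec "copy_host_file" = some [.lit "copy file"] from rfl]
  by_cases h6 : st = "notify"
  · subst h6
    simp [pvPieceVal, pvJoin0_one, show PySem.Dict.get? pvSpec "notify" = some [.lit "notify"] from rfl]
  by_cases h7 : st = "desktop_read_screen"
  · subst h7
    simp [pvPieceVal, pvJoin0_one, show PySem.Dict.get? pvSpec "desktop_read_screen" = some [.lit "read screen"] from rfl]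
  by_cases h8 : st = "desktop_screenshot"
  · subst h8
    simp [pvPieceVal, pvJoin0_one, show PySem.Dict.get? pvSpec "desktop_screenshot" = some [.lit "capture screenshot"] from rfl]
  by_cases h9 : st = "desktop_keyboard_hotkey"
  · subst h9
    simp [pvPieceVal, pvJoin0_two, show PySem.Dict.get? pvSpec "desktop_keyboard_hotkey" = some [.lit "press ", .fld "hotkey" "hotkey"] from rfl]
  by_cases h10 : st = "desktop_keyboard_type"
  · subst h10
    simp [pvPieceVal, pvJoin0_one, show PySem.Dict.get? pvSpec "desktop_keyboard_type" = some [.lit "type text"] from rfl]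
  simp [pvSpec, PySem.Dict.get?, h1, h2, h3, h4, h5, h6, h7, h8, h9, h10,
        Ne.symm h1, Ne.symm h2, Ne.symm h3, Ne.symm h4, Ne.symm h5, Ne.symm h6, Ne.symm h7,
        Ne.symm h8, Ne.symm h9, Ne.symm h10]

lemma pvParts_eq (steps : List (List (String × String))) :
    steps.foldl pvLoopBodyA [] = steps.map pvFragmentB := by
  have h : ∀ (acc : List String),
      steps.foldl pvLoopBodyA acc = acc ++ steps.map pvFragmentB := by
    induction steps with
    | nil => simp
    | cons s t ih => intro acc; simp [List.foldl_cons, pvLoopBodyA_eq, ih]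
  simpa using h []

-- the recursive renderer is join-of-the-first-k-fragments plus the suffix
lemma pvRender_eq (k : Nat) : ∀ (steps : List (List (String × String))) (suffix : String),
    1 ≤ k → k ≤ steps.length →
    pvRender steps k suffix =
      PySem.Str.join ", " ((steps.take k).map pvFragmentB) ++ suffix := by
  induction k with
  | zero => intro _ _ h; omega
  | succ k ih =>
    intro steps suffix _ hlen
    match steps, k with
    | s :: t, 0 =>
      simp [pvRender, pvJoin_singleton]
    | s :: t, Nat.succ k =>
      have hlen' : k + 1 ≤ t.length := by simpa using hlen
      have hiht := ih t suffix (by omega) hlen'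
      rcases t with _ | ⟨u, v⟩
      · simp at hlen'
      · simp only [pvRender, List.headD, List.tail_cons]
        rw [hiht]
        simp only [List.take_succ_cons, List.map_cons]
        rw [pvJoin_cons]
        simp [String.append_assoc]

-- ===== VERDICT (by name: the statement is the Claim_ definition above) =====
theorem summarize_steps_spec : Claim_equal_summarize_steps := by
  intro steps _
  unfold Spec_summarize_steps summarize_steps summarize_steps_alt
  rw [pvParts_eq]
  rcases steps with _ | ⟨s, t⟩
  · simp
  · simp only [List.map_cons, List.length_cons, List.length_map]
    have hA : ((pvFragmentB s :: t.map pvFragmentB == []) = true) = False := by simp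
    have hB : ((t.length + 1 == 0) = true) = False := by simp
    simp only [hA, hB, if_false]
    by_cases h4 : t.length + 1 ≤ 4
    · have hmin : min (t.length + 1) 4 = t.length + 1 := by omega
      rw [if_pos h4, hmin, if_neg (by omega : ¬ 4 < t.length + 1),
          pvRender_eq (t.length + 1) (s :: t) "" (by omega) (by simp),
          List.take_of_length_le (by simp)]
      simp
    · have hmin : min (t.length + 1) 4 = 4 := by omega
      rw [if_neg h4, hmin, if_pos (by omega : 4 < t.length + 1),
          pvRender_eq 4 (s :: t) _ (by omega) (by simp; omega)]
      have hslice : PySem.List.slice (pvFragmentB s :: t.map pvFragmentB) none (some 4)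
          = (pvFragmentB s :: t.map pvFragmentB).take 4 := by
        simpa using PySem.List.slice_to_natCast (xs := pvFragmentB s :: t.map pvFragmentB) (b := 4)
      rw [hslice]
      simp only [← List.map_take, List.take_succ_cons, List.map_cons]
      simp [String.append_assoc]
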